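-- pv_equiv track=rewrite | github.com/PPZeen/Comprog_graders | 09_MoreDC_34.py | pattern5
-- ===== SOURCE A (Python) =====
-- def pattern5( N ):
--     tab = []
--     k=1
--     kk=1
--     nn = N
--     for i in range(N):
--         subtab = [0]*i
--         while True:
--             if len(subtab)==N: break
--             else :
--                 subtab.append(k)
--                 k+=nn
--                 nn-=1
--         tab.append(subtab)
--         kk+=1
--         k=kk
--         nn=N
--     return tab
-- ===== SOURCE B (Python) =====
-- def pattern5(N):
--     # closed-form per entry: row i is i zeros, then for d = 0..N-i-1 the
--     # value i + 1 + d*N - d*(d-1)//2 (start of diagonal d plus row offset)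
--     return [
--         [0] * i + [i + 1 + d * N - d * (d - 1) // 2 for d in range(N - i)]
--         for i in range(N)
--     ]
-- ===== Notes on version B (the rewrite author's own statement) =====
-- stated objective: simpler
-- what changed: Replaces A's per-row while-loop with reset start value and decreasing increments (mutable state k, kk, nn) by a single comprehension computing each entry in closed form: row i is i zeros followed by the arithmetic expression i+one plus d*N minus the floor-halved product d*(d-one) for each diagonal offset d.
import Mathlib
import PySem

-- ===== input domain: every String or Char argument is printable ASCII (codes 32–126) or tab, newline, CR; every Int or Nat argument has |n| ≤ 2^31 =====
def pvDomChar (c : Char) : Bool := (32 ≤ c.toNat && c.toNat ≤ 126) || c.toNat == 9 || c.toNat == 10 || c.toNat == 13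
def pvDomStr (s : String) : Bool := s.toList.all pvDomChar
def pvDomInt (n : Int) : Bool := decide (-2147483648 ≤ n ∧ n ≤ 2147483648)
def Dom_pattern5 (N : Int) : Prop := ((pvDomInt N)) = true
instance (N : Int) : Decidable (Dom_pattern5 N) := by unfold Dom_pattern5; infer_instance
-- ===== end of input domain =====

-- B replaces A's while-loop with reset start value and decreasing increments by a
-- closed-form comprehension computing each entry directly (objective: simpler).

-- ===== PORT A =====
-- the 'while True' loop of A: appends k, k += nn, nn -= 1 until len(subtab) == N;
-- fuel only makes the recursion total, the break condition is Python's own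
def pvFillRow (N : Int) : Nat → List Int → Int → Int → List Int
  | 0, subtab, _, _ => subtab
  | fuel + 1, subtab, k, nn =>
    if (subtab.length : Int) = N then subtab
    else pvFillRow N fuel (subtab ++ [k]) (k + nn) (nn - 1)

def pattern5 (N : Int) : List (List Int) :=
  ((PySem.List.pyRange 0 N 1).foldl
    (fun (s : List (List Int) × Int × Int × Int) i =>
      -- s = (tab, k, kk, nn); [0]*i is replicate (i ≥ 0 from range)
      let subtab := pvFillRow N (N.toNat + 1) (List.replicate i.toNat 0) s.2.1 s.2.2.2
      (s.1 ++ [subtab], s.2.2.1 + 1, s.2.2.1 + 1, N))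
    ([], 1, 1, N)).1

-- ===== PORT B =====
def pattern5_alt (N : Int) : List (List Int) :=
  (PySem.List.pyRange 0 N 1).map (fun i =>
    List.replicate i.toNat 0 ++
      (PySem.List.pyRange 0 (N - i) 1).map (fun d =>
        i + 1 + d * N - PySem.Int.floordiv (d * (d - 1)) 2))

-- ===== PRECONDITION & SPEC =====
def Spec_pattern5 (N : Int) (out : List (List Int)) : Prop := out = pattern5_alt N
instance (N : Int) (out : List (List Int)) : Decidable (Spec_pattern5 N out) := by unfold Spec_pattern5; infer_instance

-- ===== CLAIM (what is proved, stated in full; the proofs are below) =====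
def Claim_equal_pattern5 : Prop := ∀ (N : Int), Dom_pattern5 N → Spec_pattern5 N (pattern5 N)

-- ===== LEMMAS AND PROOFS =====

-- the values A's while-loop appends, as a simple recursion
def pvVals : Nat → Int → Int → List Int
  | 0, _, _ => []
  | m + 1, k, nn => k :: pvVals m (k + nn) (nn - 1)

theorem pvFillRow_spec (N : Int) (hN : 0 ≤ N) :
    ∀ (m fuel : Nat) (pre : List Int) (k nn : Int),
      pre.length + m = N.toNat → m < fuel + 1 →
      pvFillRow N fuel pre k nn = pre ++ pvVals m k nn := by
  intro m
  induction m with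
  | zero =>
    intro fuel pre k nn hlen hf
    cases fuel with
    | zero => simp [pvFillRow, pvVals]
    | succ f =>
      have : (pre.length : Int) = N := by omega
      simp [pvFillRow, this, pvVals]
  | succ m ih =>
    intro fuel pre k nn hlen hf
    cases fuel with
    | zero => omega
    | succ f =>
      have hne : ¬ ((pre.length : Int) = N) := by omega
      have h2 : (pre ++ [k]).length + m = N.toNat := by simp; omega
      rw [pvFillRow, if_neg hne, ih f (pre ++ [k]) (k + nn) (nn - 1) h2 (by omega)]
      simp [pvVals]

theorem pvFld_step (d : Int) :
    PySem.Int.floordiv ((d + 1) * d) 2 = PySem.Int.floordiv (d * (d - 1)) 2 + d := by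
  obtain ⟨c, hc⟩ : Even (d * (d - 1)) := by
    have := Int.even_mul_succ_self (d - 1)
    simpa [mul_comm] using this
  have h1 : d * (d - 1) = 2 * c := by omega
  have h2 : (d + 1) * d = 2 * (c + d) := by ring_nf; ring_nf at h1; omega
  rw [h1, h2, PySem.Int.floordiv_eq_ediv_of_pos (by norm_num),
      PySem.Int.floordiv_eq_ediv_of_pos (by norm_num),
      Int.mul_ediv_cancel_left _ (by norm_num), Int.mul_ediv_cancel_left _ (by norm_num)]

theorem pvVals_closed :
    ∀ (m : Nat) (k nn : Int),
      pvVals m k nn = (List.range m).map (fun d : Nat =>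
        k + (d : Int) * nn - PySem.Int.floordiv ((d : Int) * ((d : Int) - 1)) 2) := by
  intro m
  induction m with
  | zero => intro k nn; simp [pvVals]
  | succ m ih =>
    intro k nn
    rw [pvVals, ih, List.range_succ_eq_map, List.map_cons, List.map_map]
    refine List.cons_eq_cons.mpr ⟨?_, ?_⟩
    · push_cast; norm_num [PySem.Int.floordiv]
    apply List.map_congr_left
    intro d _
    simp only [Function.comp]
    have h : ((d + 1 : Nat) : Int) = (d : Int) + 1 := by push_cast; ring
    rw [h]
    have h2 : ((d : Int) + 1) * (((d : Int) + 1) - 1) = ((d : Int) + 1) * (d : Int) := by ring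
    rw [h2, pvFld_step]
    ring

-- A's fold over range(N) with the starting state ([],1,1,N)
theorem pattern5_fold (N : Int) (hN : 0 ≤ N) :
    ∀ (m : Nat), m ≤ N.toNat →
      (((List.range m).map (Int.ofNat)).foldl
        (fun (s : List (List Int) × Int × Int × Int) i =>
          let subtab := pvFillRow N (N.toNat + 1) (List.replicate i.toNat 0) s.2.1 s.2.2.2
          (s.1 ++ [subtab], s.2.2.1 + 1, s.2.2.1 + 1, N))
        ([], 1, 1, N)) =
      ((List.range m).map (fun i =>
        List.replicate i 0 ++ pvVals (N.toNat - i) ((i : Int) + 1) N),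
        (m : Int) + 1, (m : Int) + 1, N) := by
  intro m
  induction m with
  | zero => simp
  | succ m ih =>
    intro hm
    rw [List.range_succ, List.map_append, List.foldl_append, ih (by omega)]
    simp only [List.map_cons, List.map_nil, List.foldl_cons, List.foldl_nil]
    rw [pvFillRow_spec N hN (N.toNat - m) (N.toNat + 1)
        (List.replicate (Int.ofNat m).toNat 0) ((m : Int) + 1) N
        (by simp; omega) (by omega)]
    simp only [List.map_append, List.map_cons, List.map_nil, Prod.mk.injEq,
      Int.ofNat_eq_natCast, Int.toNat_natCast]
    refine ⟨trivial, by push_cast; ring, by push_cast; ring, trivial⟩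

theorem pattern5_spec_aux (N : Int) : pattern5 N = pattern5_alt N := by
  by_cases hN : 0 ≤ N
  · unfold pattern5 pattern5_alt
    rw [PySem.List.pyRange_one]
    simp only [zero_add, Int.sub_zero]
    have hr : (List.range (N.toNat)).map (fun k : Nat => (k : Int)) =
        (List.range (N.toNat)).map Int.ofNat := rfl
    rw [hr, pattern5_fold N hN N.toNat le_rfl]
    rw [List.map_map]
    apply List.map_congr_left
    intro i hi
    have hi' : i < N.toNat := List.mem_range.mp hi
    simp only [Function.comp]
    rw [pvVals_closed, PySem.List.pyRange_one, List.map_map]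
    have h3 : (N - (i : Int) - 0).toNat = N.toNat - i := by omega
    simp only [Int.ofNat_eq_natCast, Int.toNat_natCast, Function.comp_def, zero_add, h3]
  · rw [pattern5, pattern5_alt, PySem.List.pyRange_one_eq_nil (by omega)]
    simp

-- ===== VERDICT (by name: the statement is the Claim_ definition above) =====
theorem pattern5_spec : Claim_equal_pattern5 := by
  intro N _
  unfold Spec_pattern5
  exact pattern5_spec_aux N
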